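-- pv_equiv track=rewrite | github.com/Bittu96/Other_codes | Assignment/rotate_matrix_anti_clockwise.py | matrix_rotation
-- ===== SOURCE A (Python) =====
-- def matrix_rotation(matrix, rotations):
--     side = len(matrix)
--
--     # number of loops to be rotated
--     no_of_loops = side//2
--
--     for loop in range(no_of_loops):
--
--         # loop specific co-ordinates
--         row_first, row_last = loop, side-1-loop
--         col_first, col_last = loop, side-1-loop
--
--         # 1 rotation is equal to (row_last-row_first) shifts in a loop
--         # n rotations is equal to n*(row_last-row_first) shifts in a loop
--         total_shifts = rotations*(row_last-row_first)
--
--         for _ in range(total_shifts):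
--             hold = "this_is_the_hold_value"
--
--             # top side shift
--             for i in range(col_first, col_last+1):
--                 matrix[i][row_first], hold = hold, matrix[i][row_first]
--
--             # right side shift
--             for i in range(row_first+1, row_last+1):
--                 matrix[col_last][i], hold = hold, matrix[col_last][i]
--
--             # bottom side shift
--             for i in range(col_last-1, col_first-1, -1):
--                 matrix[i][row_last], hold = hold, matrix[i][row_last]
--
--             # left side shift
--             for i in range(row_last-1, row_first-1, -1):
--                 matrix[col_first][i], hold = hold, matrix[col_first][i]
--
--     return matrix
-- ===== SOURCE B (Python) =====
-- def matrix_rotation(matrix, rotations):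
--     n = len(matrix)
--     for loop in range(n // 2):
--         lo, hi = loop, n - 1 - loop
--         # ring positions, walked once in the order the shifts travel
--         pos = [(i, lo) for i in range(lo, hi + 1)]
--         pos += [(hi, j) for j in range(lo + 1, hi + 1)]
--         pos += [(i, hi) for i in range(hi - 1, lo - 1, -1)]
--         pos += [(lo, j) for j in range(hi - 1, lo, -1)]
--         vals = [matrix[i][j] for (i, j) in pos]
--         k = (rotations * (hi - lo)) % len(pos)
--         rotated = vals[-k:] + vals[:-k]
--         for (i, j), v in zip(pos, rotated):
--             matrix[i][j] = v
--     return matrix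
-- ===== Notes on version B (the rewrite author's own statement) =====
-- stated objective: faster
-- what changed: Instead of performing rotations*(ring span) single-element ring shifts each walking the whole ring with a hold variable, B extracts each ring once as a list, reduces the total shift modulo the ring length, and writes the rotated list back in one pass.
-- outside the precondition, e.g. on matrix_rotation([[1, 2], [3, 4]], -1): A returns [[1, 2], [3, 4]], B returns [[3, 1], [4, 2]]; on matrix_rotation([[1], [2, 3]], 0): A returns [[1], [2, 3]], B raises IndexError
import Mathlib
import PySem

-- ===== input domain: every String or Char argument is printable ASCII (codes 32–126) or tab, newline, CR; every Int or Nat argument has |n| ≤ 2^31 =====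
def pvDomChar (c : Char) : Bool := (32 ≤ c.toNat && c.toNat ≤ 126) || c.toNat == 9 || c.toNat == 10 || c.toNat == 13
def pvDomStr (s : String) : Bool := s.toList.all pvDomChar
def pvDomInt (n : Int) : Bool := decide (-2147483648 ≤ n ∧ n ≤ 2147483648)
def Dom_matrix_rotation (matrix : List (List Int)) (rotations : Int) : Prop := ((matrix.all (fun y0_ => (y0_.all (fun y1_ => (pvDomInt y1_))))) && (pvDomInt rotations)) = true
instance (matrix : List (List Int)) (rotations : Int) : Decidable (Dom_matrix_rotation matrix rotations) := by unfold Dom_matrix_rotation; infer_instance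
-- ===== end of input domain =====

-- ===== PORT A =====
-- B rotates each ring in one pass (total shift reduced mod ring length) instead of A's
-- rotations*(span) single-element shifts: asymptotically faster; equivalence is about the
-- return value (both Pythons also mutate `matrix` in place; B performs the same final mutation).

-- shared 2-D indexing helpers (matrix[i][j] read / write); the loop indices reaching them are
-- ≥ 0, and Python raises IndexError out of range -- such inputs are excluded by Pre_.
def pvGet2 {α : Type} (d : α) (m : List (List α)) (i j : Int) : α :=
  (m.getD i.toNat []).getD j.toNat d

def pvSet2 {α : Type} (m : List (List α)) (i j : Int) (v : α) : List (List α) :=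
  m.set i.toNat ((m.getD i.toNat []).set j.toNat v)

-- one pass of A's inner `for _ in range(total_shifts)` body: the four side-shift loops.
-- hold = "this_is_the_hold_value" is a placeholder string (stored once, read back once into a
-- discarded hold): the cells are `Option Int` and the placeholder is `none` -- exact, since the
-- placeholder's value is never otherwise used.
def pvShift (lo hi : Int) (m : List (List (Option Int))) : List (List (Option Int)) :=
  let st1 := (PySem.List.pyRange lo (hi + 1) 1).foldl
    (fun (st : List (List (Option Int)) × Option Int) i =>
      (pvSet2 st.1 i lo st.2, pvGet2 none st.1 i lo)) (m, none)
  let st2 := (PySem.List.pyRange (lo + 1) (hi + 1) 1).foldl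
    (fun st i => (pvSet2 st.1 hi i st.2, pvGet2 none st.1 hi i)) st1
  let st3 := (PySem.List.pyRange (hi - 1) (lo - 1) (-1)).foldl
    (fun st i => (pvSet2 st.1 i hi st.2, pvGet2 none st.1 i hi)) st2
  let st4 := (PySem.List.pyRange (hi - 1) (lo - 1) (-1)).foldl
    (fun st i => (pvSet2 st.1 lo i st.2, pvGet2 none st.1 lo i)) st3
  st4.1

def matrix_rotation (matrix : List (List Int)) (rotations : Int) : List (List Int) :=
  let side : Int := matrix.length
  let res := (PySem.List.pyRange 0 (PySem.Int.floordiv side 2) 1).foldl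
    (fun m loop =>
      let lo := loop
      let hi := side - 1 - loop
      let total := rotations * (hi - lo)
      (PySem.List.pyRange 0 total 1).foldl (fun m _ => pvShift lo hi m) m)
    (matrix.map (fun row => row.map some))
  res.map (fun row => row.map (fun c => c.getD 0))

-- ===== PORT B =====
-- one ring of B: read the ring once, rotate by the reduced shift, write it back.
def pvRingPlace (rotations lo hi : Int) (m : List (List Int)) : List (List Int) :=
  let pos : List (Int × Int) :=
    (PySem.List.pyRange lo (hi + 1) 1).map (fun i => (i, lo))
    ++ (PySem.List.pyRange (lo + 1) (hi + 1) 1).map (fun j => (hi, j))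
    ++ (PySem.List.pyRange (hi - 1) (lo - 1) (-1)).map (fun i => (i, hi))
    ++ (PySem.List.pyRange (hi - 1) lo (-1)).map (fun j => (lo, j))
  let vals := pos.map (fun p => pvGet2 0 m p.1 p.2)
  let k : Int := PySem.Int.mod (rotations * (hi - lo)) pos.length
  let rotated := PySem.List.slice vals (some (-k)) none ++ PySem.List.slice vals none (some (-k))
  (pos.zip rotated).foldl (fun m pv => pvSet2 m pv.1.1 pv.1.2 pv.2) m

def matrix_rotation_alt (matrix : List (List Int)) (rotations : Int) : List (List Int) :=
  let n : Int := matrix.length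
  (PySem.List.pyRange 0 (PySem.Int.floordiv n 2) 1).foldl
    (fun m loop => pvRingPlace rotations loop (n - 1 - loop) m) matrix

-- ===== PRECONDITION & SPEC =====
-- For matrices with at least one ring (side ≥ 2), Pre_ excludes negative rotation counts
-- (outside the task's natural domain: A leaves the matrix unchanged there, B rotates
-- backwards) and matrices with a row shorter than the side (A raises IndexError whenever it
-- shifts; B always reads the full ring); matrices of side ≤ 1 are untouched by both.
def Pre_matrix_rotation (matrix : List (List Int)) (rotations : Int) : Prop :=
  matrix.length ≤ 1 ∨ (0 ≤ rotations ∧ ∀ row ∈ matrix, matrix.length ≤ row.length)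

instance (matrix : List (List Int)) (rotations : Int) : Decidable (Pre_matrix_rotation matrix rotations) := by
  unfold Pre_matrix_rotation; infer_instance

def pvWitness_matrix_rotation : List (List Int) × Int := ([[1, 2], [3, 4]], 1)

def Spec_matrix_rotation (matrix : List (List Int)) (rotations : Int) (out : List (List Int)) : Prop := out = matrix_rotation_alt matrix rotations
instance (matrix : List (List Int)) (rotations : Int) (out : List (List Int)) : Decidable (Spec_matrix_rotation matrix rotations out) := by unfold Spec_matrix_rotation; infer_instance

-- ===== CLAIM (what is proved, stated in full; the proofs are below) =====
def Claim_equal_matrix_rotation : Prop := ∀ (matrix : List (List Int)) (rotations : Int), Dom_matrix_rotation matrix rotations → Pre_matrix_rotation matrix rotations → Spec_matrix_rotation matrix rotations (matrix_rotation matrix rotations)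

-- ===== LEMMAS AND PROOFS =====

-- ---- 2-D get / set on Nat coordinates (the proof-side view of pvGet2 / pvSet2) ----

def g2 {α : Type} (d : α) (m : List (List α)) (p : Nat × Nat) : α :=
  (m.getD p.1 []).getD p.2 d

def s2 {α : Type} (m : List (List α)) (p : Nat × Nat) (v : α) : List (List α) :=
  m.set p.1 ((m.getD p.1 []).set p.2 v)

theorem pvGet2_eq {α : Type} (d : α) (m : List (List α)) (i j : Int) :
    pvGet2 d m i j = g2 d m (i.toNat, j.toNat) := rfl

theorem pvSet2_eq {α : Type} (m : List (List α)) (i j : Int) (v : α) :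
    pvSet2 m i j v = s2 m (i.toNat, j.toNat) v := rfl

-- sequential writes
def wr {α : Type} (m : List (List α)) (l : List ((Nat × Nat) × α)) : List (List α) :=
  l.foldl (fun m pv => s2 m pv.1 pv.2) m

theorem getD_s2 {α : Type} (m : List (List α)) (p : Nat × Nat) (v : α) (i : Nat) :
    (s2 m p v).getD i [] =
      if p.1 = i ∧ p.1 < m.length then (m.getD p.1 []).set p.2 v else m.getD i [] := by
  unfold s2
  rcases Nat.lt_or_ge p.1 m.length with h2 | h2
  · by_cases h1 : p.1 = i
    · subst h1
      rw [if_pos ⟨rfl, h2⟩, List.getD_eq_getElem?_getD, List.getElem?_set, if_pos rfl, if_pos h2]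
      rfl
    · rw [if_neg (by tauto), List.getD_eq_getElem?_getD, List.getElem?_set, if_neg h1,
        ← List.getD_eq_getElem?_getD]
  · have hno : m.set p.1 ((m.getD p.1 []).set p.2 v) = m := List.set_eq_of_length_le (by omega)
    rw [hno, if_neg (by rintro ⟨-, h3⟩; omega)]

theorem length_s2 {α : Type} (m : List (List α)) (p : Nat × Nat) (v : α) :
    (s2 m p v).length = m.length := by simp [s2]

theorem rowlen_s2 {α : Type} (m : List (List α)) (p : Nat × Nat) (v : α) (i : Nat) :
    ((s2 m p v).getD i []).length = (m.getD i []).length := by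
  rw [getD_s2]
  split_ifs with h
  · rw [List.length_set, h.1]
  · rfl

theorem g2_s2_ne {α : Type} (d : α) (m : List (List α)) {p q : Nat × Nat} (h : q ≠ p) (v : α) :
    g2 d (s2 m p v) q = g2 d m q := by
  unfold g2
  rw [getD_s2]
  split_ifs with h1
  · have hq : q.2 ≠ p.2 := by
      intro h2; exact h (Prod.ext (h1.1.symm) h2)
    rw [h1.1]
    simp only [List.getD_eq_getElem?_getD, List.getElem?_set]
    rw [if_neg (fun he => hq he.symm)]
  · rfl

theorem g2_s2_eq {α : Type} (d : α) (m : List (List α)) (p : Nat × Nat) (v : α)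
    (h1 : p.1 < m.length) (h2 : p.2 < (m.getD p.1 []).length) :
    g2 d (s2 m p v) p = v := by
  unfold g2
  rw [getD_s2, if_pos ⟨rfl, h1⟩, List.getD_eq_getElem?_getD, List.getElem?_set, if_pos rfl,
    if_pos h2]
  rfl

theorem s2_s2_eq {α : Type} (m : List (List α)) (p : Nat × Nat) (v w : α) :
    s2 (s2 m p v) p w = s2 m p w := by
  unfold s2
  rw [show (m.set p.1 ((m.getD p.1 []).set p.2 v)).getD p.1 [] = _ from getD_s2 m p v p.1]
  by_cases h : p.1 < m.length
  · rw [if_pos ⟨rfl, h⟩, List.set_set, List.set_set]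
  · have h1 : m.set p.1 ((m.getD p.1 []).set p.2 v) = m :=
      List.set_eq_of_length_le (by omega)
    rw [if_neg (by simp [h]), h1]

theorem s2_s2_ne {α : Type} (m : List (List α)) {p q : Nat × Nat} (h : p ≠ q) (u w : α) :
    s2 (s2 m q u) p w = s2 (s2 m p w) q u := by
  by_cases h1 : p.1 = q.1
  · -- same row, different column
    have h2 : p.2 ≠ q.2 := fun h2 => h (Prod.ext h1 h2)
    by_cases hl : q.1 < m.length
    · have e1 : (s2 m q u).getD p.1 [] = (m.getD q.1 []).set q.2 u :=
        (getD_s2 m q u p.1).trans (if_pos ⟨h1.symm, hl⟩)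
      have e2 : (s2 m p w).getD q.1 [] = (m.getD p.1 []).set p.2 w :=
        (getD_s2 m p w q.1).trans (if_pos ⟨h1, by omega⟩)
      show (s2 m q u).set p.1 (((s2 m q u).getD p.1 []).set p.2 w)
          = (s2 m p w).set q.1 (((s2 m p w).getD q.1 []).set q.2 u)
      rw [e1, e2]
      unfold s2
      rw [h1, List.set_set, List.set_set, List.set_comm _ _ (by omega)]
    · have hq' : s2 m q u = m := List.set_eq_of_length_le (by omega)
      have hp' : s2 m p w = m := List.set_eq_of_length_le (by omega)
      rw [hq', hp']
      exact hq'.symm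
  · -- different rows
    have e1 : (s2 m q u).getD p.1 [] = m.getD p.1 [] :=
      (getD_s2 m q u p.1).trans (if_neg (fun hc => h1 hc.1.symm))
    have e2 : (s2 m p w).getD q.1 [] = m.getD q.1 [] :=
      (getD_s2 m p w q.1).trans (if_neg (fun hc => h1 hc.1))
    show (s2 m q u).set p.1 (((s2 m q u).getD p.1 []).set p.2 w)
        = (s2 m p w).set q.1 (((s2 m p w).getD q.1 []).set q.2 u)
    rw [e1, e2]
    unfold s2
    exact List.set_comm _ _ (fun h' => h1 h'.symm)

theorem s2_wr_comm {α : Type} (p : Nat × Nat) (w : α) :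
    ∀ (l : List ((Nat × Nat) × α)) (m : List (List α)), (∀ e ∈ l, e.1 ≠ p) →
    s2 (wr m l) p w = wr (s2 m p w) l := by
  intro l
  induction l with
  | nil => intro m _; rfl
  | cons e l ih =>
    intro m h
    have h1 : e.1 ≠ p := h e (by simp)
    show s2 (wr (s2 m e.1 e.2) l) p w = wr (s2 (s2 m p w) e.1 e.2) l
    rw [ih _ (fun e' he => h e' (by simp [he])), s2_s2_ne _ (fun h' => h1 h'.symm)]

-- overwriting the head value of a write sequence over distinct positions
theorem s2_wr_head {α : Type} (p0 : Nat × Nat) (P' : List (Nat × Nat)) (v0 w : α)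
    (us : List α) (m : List (List α)) (hnd : (p0 :: P').Nodup) :
    s2 (wr m ((p0 :: P').zip (v0 :: us))) p0 w = wr m ((p0 :: P').zip (w :: us)) := by
  have hp0 : p0 ∉ P' := by simp at hnd; exact hnd.1
  show s2 (wr (s2 m p0 v0) (P'.zip us)) p0 w = wr (s2 m p0 w) (P'.zip us)
  rw [s2_wr_comm p0 w (P'.zip us) (s2 m p0 v0)
      (by intro e he h'; exact hp0 (show p0 ∈ P' from h' ▸ (List.of_mem_zip he).1)), s2_s2_eq]

-- shape preservation for write sequences
theorem length_wr {α : Type} : ∀ (l : List ((Nat × Nat) × α)) (m : List (List α)),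
    (wr m l).length = m.length := by
  intro l
  induction l with
  | nil => intro m; rfl
  | cons e l ih => intro m; show (wr (s2 m e.1 e.2) l).length = _; rw [ih, length_s2]

theorem rowlen_wr {α : Type} : ∀ (l : List ((Nat × Nat) × α)) (m : List (List α)) (i : Nat),
    ((wr m l).getD i []).length = (m.getD i []).length := by
  intro l
  induction l with
  | nil => intro m i; rfl
  | cons e l ih => intro m i; show ((wr (s2 m e.1 e.2) l).getD i []).length = _
                   rw [ih, rowlen_s2]

theorem g2_wr_ne {α : Type} (d : α) : ∀ (l : List ((Nat × Nat) × α)) (m : List (List α))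
    (q : Nat × Nat), (∀ e ∈ l, e.1 ≠ q) → g2 d (wr m l) q = g2 d m q := by
  intro l
  induction l with
  | nil => intro m q _; rfl
  | cons e l ih =>
    intro m q h
    show g2 d (wr (s2 m e.1 e.2) l) q = _
    rw [ih _ _ (fun e' he => h e' (by simp [he])), g2_s2_ne _ _ (fun h' => h e (by simp) h'.symm)]

def inb {α : Type} (m : List (List α)) (p : Nat × Nat) : Prop :=
  p.1 < m.length ∧ p.2 < (m.getD p.1 []).length

theorem inb_s2 {α : Type} (m : List (List α)) (p q : Nat × Nat) (v : α) :
    inb (s2 m p v) q ↔ inb m q := by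
  unfold inb; rw [length_s2, rowlen_s2]

theorem g2_wr_zip {α : Type} (d : α) : ∀ (ps : List (Nat × Nat)) (vs : List α)
    (m : List (List α)) (i : Nat) (hi : i < ps.length) (_hv : i < vs.length),
    ps.Nodup → (∀ p ∈ ps, inb m p) →
    g2 d (wr m (ps.zip vs)) ps[i] = vs[i] := by
  intro ps
  induction ps with
  | nil => intro vs m i hi; exact absurd hi (by simp)
  | cons p ps ih =>
    intro vs m i hi hv hnd hb
    match vs with
    | [] => simp at hv
    | v :: vs =>
      have hp0 : p ∉ ps := by simp at hnd; exact hnd.1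
      match i with
      | 0 =>
        show g2 d (wr (s2 m p v) (ps.zip vs)) p = v
        rw [g2_wr_ne d (ps.zip vs) (s2 m p v) p
          (fun e he h' => hp0 (show p ∈ ps from h' ▸ (List.of_mem_zip he).1))]
        exact g2_s2_eq d m p v (hb p (by simp)).1 (hb p (by simp)).2
      | i + 1 =>
        have hi' : i < ps.length := by simpa using hi
        have hv' : i < vs.length := by simpa using hv
        show g2 d (wr (s2 m p v) (ps.zip vs)) (ps[i]'hi') = vs[i]'hv'
        exact ih vs (s2 m p v) i hi' hv'
          (by simp at hnd; exact hnd.2)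
          (fun q hq => (inb_s2 m p q v).mpr (hb q (by simp [hq])))

-- matrix extensionality through g2
theorem mat_ext {α : Type} (d : α) (m₁ m₂ : List (List α))
    (hl : m₁.length = m₂.length)
    (hr : ∀ i, (m₁.getD i []).length = (m₂.getD i []).length)
    (hg : ∀ p, g2 d m₁ p = g2 d m₂ p) : m₁ = m₂ := by
  apply List.ext_getElem hl
  intro i h1 h2
  apply List.ext_getElem
  · have := hr i
    rwa [List.getD_eq_getElem _ _ h1, List.getD_eq_getElem _ _ h2] at this
  · intro j hj1 hj2
    have := hg (i, j)
    unfold g2 at this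
    rwa [List.getD_eq_getElem _ _ h1, List.getD_eq_getElem _ _ h2,
      List.getD_eq_getElem _ _ hj1, List.getD_eq_getElem _ _ hj2] at this

theorem mem_zip_fst {α : Type} {ps : List (Nat × Nat)} {vs : List α}
    {e : (Nat × Nat) × α} (he : e ∈ ps.zip vs) : e.1 ∈ ps :=
  (List.of_mem_zip (by exact he)).1

-- writing back what was read is the identity
theorem wr_self {α : Type} (d : α) (ps : List (Nat × Nat)) (m : List (List α))
    (hnd : ps.Nodup) (hb : ∀ p ∈ ps, inb m p) :
    wr m (ps.zip (ps.map (g2 d m))) = m := by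
  apply mat_ext d
  · exact length_wr _ _
  · exact fun i => rowlen_wr _ _ i
  · intro q
    by_cases hq : q ∈ ps
    · obtain ⟨i, hi, rfl⟩ := List.getElem_of_mem hq
      rw [g2_wr_zip d ps _ m i hi (by simpa using hi) hnd hb, List.getElem_map]
    · exact g2_wr_ne d _ m q (fun e he h' => hq (show q ∈ ps from h' ▸ mem_zip_fst he))

-- a second write pass over the same (distinct) positions overwrites the first
theorem wr_wr {α : Type} (d : α) (ps : List (Nat × Nat)) (vs vs' : List α)
    (m : List (List α)) (hnd : ps.Nodup) (hb : ∀ p ∈ ps, inb m p)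
    (_hv : vs.length = ps.length) (hv' : vs'.length = ps.length) :
    wr (wr m (ps.zip vs)) (ps.zip vs') = wr m (ps.zip vs') := by
  have hb2 : ∀ p ∈ ps, inb (wr m (ps.zip vs)) p := by
    intro p hp
    have := hb p hp
    unfold inb at this ⊢
    rwa [length_wr, rowlen_wr]
  apply mat_ext d
  · rw [length_wr, length_wr, length_wr]
  · intro i; rw [rowlen_wr, rowlen_wr, rowlen_wr]
  · intro q
    by_cases hq : q ∈ ps
    · obtain ⟨i, hi, rfl⟩ := List.getElem_of_mem hq
      rw [g2_wr_zip d ps _ _ i hi (by omega) hnd hb2, g2_wr_zip d ps _ _ i hi (by omega) hnd hb]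
    · rw [g2_wr_ne d _ _ q (fun e he h' => hq (show q ∈ ps from h' ▸ mem_zip_fst he)),
        g2_wr_ne d _ _ q (fun e he h' => hq (show q ∈ ps from h' ▸ mem_zip_fst he)),
        g2_wr_ne d _ _ q (fun e he h' => hq (show q ∈ ps from h' ▸ mem_zip_fst he))]

-- reading the positions of a write sequence back gives the written values
theorem wr_read {α : Type} (d : α) (ps : List (Nat × Nat)) (vs : List α)
    (m : List (List α)) (hnd : ps.Nodup) (hb : ∀ p ∈ ps, inb m p)
    (hv : vs.length = ps.length) :
    ps.map (g2 d (wr m (ps.zip vs))) = vs := by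
  apply List.ext_getElem (by simp [hv])
  intro i h1 h2
  rw [List.getElem_map]
  exact g2_wr_zip d ps vs m i (by simpa using h1) h2 hnd hb

-- the state thread of A's four side loops
theorem thr_spec {α : Type} (d : α) : ∀ (ps : List (Nat × Nat)) (m : List (List α)) (h : α),
    ps.Nodup →
    ps.foldl (fun st p => (s2 st.1 p st.2, g2 d st.1 p)) (m, h)
      = (wr m (ps.zip (h :: ps.map (g2 d m))), (ps.map (g2 d m)).getLastD h) := by
  intro ps
  induction ps with
  | nil => intro m h _; rfl
  | cons p ps ih =>
    intro m h hnd
    have hp0 : p ∉ ps := by simp at hnd; exact hnd.1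
    show ps.foldl _ (s2 m p h, g2 d m p) = _
    rw [ih (s2 m p h) (g2 d m p) (by simp at hnd; exact hnd.2)]
    have hmap : ps.map (g2 d (s2 m p h)) = ps.map (g2 d m) :=
      List.map_congr_left (fun q hq =>
        g2_s2_ne (p := p) (q := q) d m (fun h' => hp0 (h' ▸ hq)) h)
    rw [hmap]
    simp only [List.map_cons, List.zip_cons_cons, List.getLastD_cons]
    rfl


-- ---- the ring of a square matrix, walked in the order A's shifts travel ----

def ringP (a b : Nat) : List (Nat × Nat) :=
  ((List.range (b + 1 - a)).map fun t => (a + t, a))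
  ++ ((List.range (b - a)).map fun t => (b, a + 1 + t))
  ++ ((List.range (b - a)).map fun t => (b - 1 - t, b))
  ++ ((List.range (b - a - 1)).map fun t => (a, b - 1 - t))

theorem mem_ringP {a b : Nat} (hab : a < b) {p : Nat × Nat} (hp : p ∈ ringP a b) :
    a ≤ p.1 ∧ p.1 ≤ b ∧ a ≤ p.2 ∧ p.2 ≤ b := by
  simp only [ringP, List.mem_append, List.mem_map, List.mem_range] at hp
  rcases hp with ((⟨t, ht, rfl⟩ | ⟨t, ht, rfl⟩) | ⟨t, ht, rfl⟩) | ⟨t, ht, rfl⟩ <;> omega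

theorem length_ringP {a b : Nat} (hab : a < b) : (ringP a b).length = 4 * (b - a) := by
  simp [ringP]
  omega

theorem nodup_ringP {a b : Nat} (hab : a < b) : (ringP a b).Nodup := by
  have inj : ∀ (f : Nat → Nat × Nat) (n : Nat),
      (∀ t ∈ List.range n, ∀ s ∈ List.range n, f t = f s → t = s) →
      ((List.range n).map f).Nodup :=
    fun f n h => List.Nodup.map_on h (List.nodup_range)
  have n1 : ((List.range (b + 1 - a)).map fun t => ((a + t, a) : Nat × Nat)).Nodup :=
    inj _ _ (by intro t _ s _ h; injection h with h1 h2; omega)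
  have n2 : ((List.range (b - a)).map fun t => ((b, a + 1 + t) : Nat × Nat)).Nodup :=
    inj _ _ (by intro t _ s _ h; injection h with h1 h2; omega)
  have n3 : ((List.range (b - a)).map fun t => ((b - 1 - t, b) : Nat × Nat)).Nodup :=
    inj _ _ (by simp only [List.mem_range]; intro t ht s hs h; injection h with h1 h2; omega)
  have n4 : ((List.range (b - a - 1)).map fun t => ((a, b - 1 - t) : Nat × Nat)).Nodup :=
    inj _ _ (by simp only [List.mem_range]; intro t ht s hs h; injection h with h1 h2; omega)
  unfold ringP
  refine ((n1.append n2 ?_).append n3 ?_).append n4 ?_ <;>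
    rw [List.disjoint_left] <;>
    simp only [List.mem_append, List.mem_map, List.mem_range] <;>
    rintro p hp hq <;>
    [ (obtain ⟨t, ht, rfl⟩ := hp; obtain ⟨s, hs, he⟩ := hq);
      (rcases hp with ⟨t, ht, rfl⟩ | ⟨t, ht, rfl⟩; all_goals obtain ⟨s, hs, he⟩ := hq);
      (rcases hp with (⟨t, ht, rfl⟩ | ⟨t, ht, rfl⟩) | ⟨t, ht, rfl⟩
       all_goals obtain ⟨s, hs, he⟩ := hq)] <;>
    (injection he with h1 h2; omega)

def ringT (a b : Nat) : List (Nat × Nat) :=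
  ((List.range (b - a)).map fun t => (a + 1 + t, a))
  ++ ((List.range (b - a)).map fun t => (b, a + 1 + t))
  ++ ((List.range (b - a)).map fun t => (b - 1 - t, b))
  ++ ((List.range (b - a - 1)).map fun t => (a, b - 1 - t))

theorem ringP_cons {a b : Nat} (hab : a < b) : ringP a b = (a, a) :: ringT a b := by
  unfold ringP ringT
  have h1 : b + 1 - a = (b - a) + 1 := by omega
  rw [h1, List.range_succ_eq_map, List.map_cons, List.map_map,
    List.map_congr_left (g := fun t => ((a + 1 + t, a) : Nat × Nat))
      (fun t _ => by
        simp only [Function.comp_apply]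
        exact congrArg (·, a) (by omega))]
  rfl

-- ---- wrapping Int matrices into Option Int matrices (port A's cell type) ----

def wrap (m : List (List Int)) : List (List (Option Int)) :=
  m.map (fun r => r.map some)

theorem getD_wrap (m : List (List Int)) (i : Nat) :
    (wrap m).getD i [] = (m.getD i []).map some := by
  unfold wrap
  rw [List.getD_eq_getElem?_getD, List.getD_eq_getElem?_getD, List.getElem?_map]
  cases m[i]? <;> rfl

theorem s2_wrap (m : List (List Int)) (p : Nat × Nat) (v : Int) :
    s2 (wrap m) p (some v) = wrap (s2 m p v) := by
  unfold s2
  rw [getD_wrap, ← List.map_set]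
  unfold wrap
  rw [← List.map_set]

theorem g2_wrap (m : List (List Int)) (p : Nat × Nat) (hb : inb m p) :
    g2 none (wrap m) p = some (g2 0 m p) := by
  unfold g2
  rw [getD_wrap, List.getD_eq_getElem _ none (by simpa using hb.2), List.getElem_map,
    List.getD_eq_getElem _ 0 hb.2]

theorem wr_wrap : ∀ (ps : List (Nat × Nat)) (vs : List Int) (m : List (List Int)),
    wr (wrap m) (ps.zip (vs.map some)) = wrap (wr m (ps.zip vs)) := by
  intro ps
  induction ps with
  | nil => intro vs m; rfl
  | cons p ps ih =>
    intro vs m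
    match vs with
    | [] => rfl
    | v :: vs =>
      show wr (s2 (wrap m) p (some v)) (ps.zip (vs.map some)) = _
      rw [s2_wrap]
      exact ih vs (s2 m p v)

-- ---- generic list facts used below ----

theorem zip_take_len {α β : Type} : ∀ (l : List α) (l' : List β),
    l.zip l' = l.zip (l'.take l.length) := by
  intro l
  induction l with
  | nil => intro l'; rfl
  | cons x l ih =>
    intro l'
    cases l' with
    | nil => rfl
    | cons y l' => simp [List.zip_cons_cons, ih l']

theorem rot1_eq_rotate {α : Type} (d : α) (l : List α) (h : l ≠ []) :
    l.getLastD d :: l.dropLast = l.rotate (l.length - 1) := by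
  rw [List.rotate_eq_drop_append_take (by omega), List.drop_length_sub_one h,
    List.getLastD_eq_getLast?, List.getLast?_eq_some_getLast h, List.dropLast_eq_take]
  rfl

theorem foldl_const_eq_iterate {α β : Type} (f : α → α) :
    ∀ (l : List β) (x : α), l.foldl (fun acc _ => f acc) x = f^[l.length] x := by
  intro l
  induction l with
  | nil => intro x; rfl
  | cons y l ih => intro x; rw [List.foldl_cons, ih, List.length_cons,
      Function.iterate_succ_apply]


-- ---- A's single shift pass, characterized as one ring rotation ----

theorem shift_as_thr {a b : Nat} (hab : a < b) (M : List (List (Option Int))) :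
    pvShift (a : Int) (b : Int) M =
      ((ringP a b ++ [(a, a)]).foldl
        (fun st p => (s2 st.1 p st.2, g2 (none : Option Int) st.1 p)) (M, none)).1 := by
  have L1 : ∀ st0 : List (List (Option Int)) × Option Int,
      (PySem.List.pyRange (a : Int) ((b : Int) + 1) 1).foldl
        (fun st i => (pvSet2 st.1 i (a : Int) st.2, pvGet2 none st.1 i (a : Int))) st0
      = ((List.range (b + 1 - a)).map (fun t => ((a + t, a) : Nat × Nat))).foldl
        (fun st p => (s2 st.1 p st.2, g2 none st.1 p)) st0 := by
    intro st0
    rw [PySem.List.pyRange_one, show (((b : Int) + 1) - (a : Int)).toNat = b + 1 - a by omega,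
      List.foldl_map, List.foldl_map]
    apply PySem.List.foldl_congr_mem
    intro st k hk
    rw [pvSet2_eq, pvGet2_eq, show ((a : Int) + (k : Int)).toNat = a + k by omega,
      show ((a : Int)).toNat = a by omega]
  have L2 : ∀ st0 : List (List (Option Int)) × Option Int,
      (PySem.List.pyRange ((a : Int) + 1) ((b : Int) + 1) 1).foldl
        (fun st i => (pvSet2 st.1 (b : Int) i st.2, pvGet2 none st.1 (b : Int) i)) st0
      = ((List.range (b - a)).map (fun t => ((b, a + 1 + t) : Nat × Nat))).foldl
        (fun st p => (s2 st.1 p st.2, g2 none st.1 p)) st0 := by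
    intro st0
    rw [PySem.List.pyRange_one,
      show (((b : Int) + 1) - ((a : Int) + 1)).toNat = b - a by omega,
      List.foldl_map, List.foldl_map]
    apply PySem.List.foldl_congr_mem
    intro st k hk
    rw [pvSet2_eq, pvGet2_eq, show ((a : Int) + 1 + (k : Int)).toNat = a + 1 + k by omega,
      show ((b : Int)).toNat = b by omega]
  have L3 : ∀ st0 : List (List (Option Int)) × Option Int,
      (PySem.List.pyRange ((b : Int) - 1) ((a : Int) - 1) (-1)).foldl
        (fun st i => (pvSet2 st.1 i (b : Int) st.2, pvGet2 none st.1 i (b : Int))) st0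
      = ((List.range (b - a)).map (fun t => ((b - 1 - t, b) : Nat × Nat))).foldl
        (fun st p => (s2 st.1 p st.2, g2 none st.1 p)) st0 := by
    intro st0
    rw [PySem.List.pyRange_neg_one,
      show (((b : Int) - 1) - ((a : Int) - 1)).toNat = b - a by omega,
      List.foldl_map, List.foldl_map]
    apply PySem.List.foldl_congr_mem
    intro st k hk
    rw [List.mem_range] at hk
    rw [pvSet2_eq, pvGet2_eq, show ((b : Int) - 1 - (k : Int)).toNat = b - 1 - k by omega,
      show ((b : Int)).toNat = b by omega]
  have L4 : ∀ st0 : List (List (Option Int)) × Option Int,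
      (PySem.List.pyRange ((b : Int) - 1) ((a : Int) - 1) (-1)).foldl
        (fun st i => (pvSet2 st.1 (a : Int) i st.2, pvGet2 none st.1 (a : Int) i)) st0
      = (((List.range (b - a - 1)).map (fun t => ((a, b - 1 - t) : Nat × Nat)))
          ++ [(a, a)]).foldl
        (fun st p => (s2 st.1 p st.2, g2 none st.1 p)) st0 := by
    intro st0
    have hsplit : (List.range (b - a)).map (fun t => ((a, b - 1 - t) : Nat × Nat))
        = ((List.range (b - a - 1)).map (fun t => ((a, b - 1 - t) : Nat × Nat))) ++ [(a, a)] := by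
      rw [congrArg List.range (show b - a = (b - a - 1) + 1 by omega), List.range_succ,
        List.map_append]
      simp only [List.map_cons, List.map_nil]
      rw [show b - 1 - (b - a - 1) = a by omega]
    rw [← hsplit, PySem.List.pyRange_neg_one,
      show (((b : Int) - 1) - ((a : Int) - 1)).toNat = b - a by omega,
      List.foldl_map, List.foldl_map]
    apply PySem.List.foldl_congr_mem
    intro st k hk
    rw [List.mem_range] at hk
    rw [pvSet2_eq, pvGet2_eq, show ((b : Int) - 1 - (k : Int)).toNat = b - 1 - k by omega,
      show ((a : Int)).toNat = a by omega]
  show ((PySem.List.pyRange ((b:Int) - 1) ((a:Int) - 1) (-1)).foldl _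
      ((PySem.List.pyRange ((b:Int) - 1) ((a:Int) - 1) (-1)).foldl _
        ((PySem.List.pyRange ((a:Int) + 1) ((b:Int) + 1) 1).foldl _
          ((PySem.List.pyRange (a:Int) ((b:Int) + 1) 1).foldl _ (M, none))))).1 = _
  rw [L1, L2, L3, L4]
  unfold ringP
  simp only [List.foldl_append]

theorem shift_eq (a b : Nat) (hab : a < b) (m : List (List Int))
    (hb : ∀ p ∈ ringP a b, inb m p) :
    pvShift (a : Int) (b : Int) (wrap m)
      = wrap (wr m ((ringP a b).zip
          (((ringP a b).map (g2 0 m)).rotate ((ringP a b).length - 1)))) := by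
  set P := ringP a b with hP
  set vals := P.map (g2 0 m) with hvals
  have hLpos : 0 < P.length := by rw [hP, length_ringP hab]; omega
  have hvals_len : vals.length = P.length := by rw [hvals, List.length_map]
  have hvals_ne : vals ≠ [] := by
    intro h; rw [h] at hvals_len; simp at hvals_len; omega
  have hmap : P.map (g2 none (wrap m)) = vals.map some := by
    rw [hvals, List.map_map]
    exact List.map_congr_left (fun p hp => g2_wrap m p (hb p hp))
  have hlast : (vals.map some).getLastD none = some (vals.getLastD 0) := by
    rw [List.getLastD_eq_getLast?, List.getLast?_map,
      List.getLast?_eq_some_getLast hvals_ne, List.getLastD_eq_getLast?,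
      List.getLast?_eq_some_getLast hvals_ne]
    rfl
  rw [shift_as_thr hab, List.foldl_append,
    thr_spec none P (wrap m) none (hP ▸ nodup_ringP hab)]
  show s2 (wr (wrap m) (P.zip (none :: P.map (g2 none (wrap m))))) (a, a)
      ((P.map (g2 none (wrap m))).getLastD none) = _
  rw [hmap, hlast]
  have hcons : P = (a, a) :: ringT a b := hP ▸ ringP_cons hab
  rw [hcons, s2_wr_head _ _ _ _ _ _ (hcons ▸ (hP ▸ nodup_ringP hab)), ← hcons]
  have : (some (vals.getLastD 0) :: vals.map some) = (vals.getLastD 0 :: vals).map some := rfl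
  rw [this, wr_wrap]
  congr 1
  rw [zip_take_len P (vals.getLastD 0 :: vals),
    show P.length = (vals.length - 1) + 1 by omega, List.take_succ_cons,
    ← List.dropLast_eq_take, rot1_eq_rotate 0 vals hvals_ne, hvals_len]
  rw [show P.length - 1 + 1 - 1 = P.length - 1 by omega]


-- ---- iterating A's shift rotates the ring t positions backwards ----

theorem iter_shift (a b : Nat) (hab : a < b) (m : List (List Int))
    (hb : ∀ p ∈ ringP a b, inb m p) (t : Nat) :
    (fun M => pvShift (a : Int) (b : Int) M)^[t] (wrap m)
      = wrap (wr m ((ringP a b).zip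
          (((ringP a b).map (g2 0 m)).rotate (((ringP a b).length - 1) * t)))) := by
  induction t with
  | zero =>
    simp only [Function.iterate_zero, id, Nat.mul_zero, List.rotate_zero]
    rw [wr_self 0 _ _ (nodup_ringP hab) hb]
  | succ t ih =>
    rw [Function.iterate_succ_apply', ih]
    have hlen1 : (((ringP a b).map (g2 0 m)).rotate (((ringP a b).length - 1) * t)).length
        = (ringP a b).length := by rw [List.length_rotate, List.length_map]
    have hb2 : ∀ p ∈ ringP a b,
        inb (wr m ((ringP a b).zip
          (((ringP a b).map (g2 0 m)).rotate (((ringP a b).length - 1) * t)))) p := by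
      intro p hp
      have := hb p hp
      unfold inb at this ⊢
      rwa [length_wr, rowlen_wr]
    rw [shift_eq a b hab _ hb2,
      wr_read 0 (ringP a b) _ m (nodup_ringP hab) hb hlen1,
      List.rotate_rotate,
      wr_wr 0 (ringP a b) _ _ m (nodup_ringP hab) hb hlen1
        (by rw [List.length_rotate, List.length_map]),
      show ((ringP a b).length - 1) * t + ((ringP a b).length - 1)
        = ((ringP a b).length - 1) * (t + 1) by rw [Nat.mul_succ]]

-- ---- modular arithmetic relating A's t backward steps to B's reduced shift ----

theorem mod_arith (L T : Nat) (hL : 0 < L) : ((L - 1) * T) % L = (L - T % L) % L := by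
  have h1 : ((L - 1) * (T % L)) % L = ((L - 1) * T) % L :=
    Nat.ModEq.mul_left (L - 1) (Nat.mod_modEq T L)
  rw [← h1]
  have hknL : T % L < L := Nat.mod_lt _ hL
  rcases Nat.eq_zero_or_pos (T % L) with h0 | hpos
  · rw [h0, Nat.mul_zero, Nat.zero_mod, Nat.sub_zero, Nat.mod_self]
  · have he : (L - 1) * (T % L) = (L - T % L) + (T % L - 1) * L := by
      zify [show 1 ≤ L by omega, hpos, show T % L ≤ L by omega]
      ring
    rw [he, Nat.add_mul_mod_self_right]

-- ---- B's ring body, characterized as the same write sequence ----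

theorem ringB_pos (a b : Nat) (hab : a < b) :
    ((PySem.List.pyRange (a : Int) ((b : Int) + 1) 1).map (fun i => (i, (a : Int)))
      ++ (PySem.List.pyRange ((a : Int) + 1) ((b : Int) + 1) 1).map (fun j => ((b : Int), j))
      ++ (PySem.List.pyRange ((b : Int) - 1) ((a : Int) - 1) (-1)).map (fun i => (i, (b : Int)))
      ++ (PySem.List.pyRange ((b : Int) - 1) (a : Int) (-1)).map (fun j => ((a : Int), j)))
    = (ringP a b).map (fun p => ((p.1 : Int), (p.2 : Int))) := by
  unfold ringP
  simp only [List.map_append, List.map_map]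
  rw [PySem.List.pyRange_one, PySem.List.pyRange_one, PySem.List.pyRange_neg_one,
    PySem.List.pyRange_neg_one,
    show (((b : Int) + 1) - (a : Int)).toNat = b + 1 - a by omega,
    show (((b : Int) + 1) - ((a : Int) + 1)).toNat = b - a by omega,
    show (((b : Int) - 1) - ((a : Int) - 1)).toNat = b - a by omega,
    show (((b : Int) - 1) - (a : Int)).toNat = b - a - 1 by omega,
    List.map_map, List.map_map, List.map_map, List.map_map]
  refine congrArg₂ (· ++ ·) (congrArg₂ (· ++ ·) (congrArg₂ (· ++ ·) ?_ ?_) ?_) ?_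
  · exact List.map_congr_left (fun t _ => by
      simp only [Function.comp_apply]
      exact Prod.ext (by push_cast; ring) rfl)
  · exact List.map_congr_left (fun t _ => by
      simp only [Function.comp_apply]
      exact Prod.ext rfl (by push_cast; ring))
  · exact List.map_congr_left (fun t ht => by
      simp only [List.mem_range] at ht
      simp only [Function.comp_apply]
      exact Prod.ext (by omega) rfl)
  · exact List.map_congr_left (fun t ht => by
      simp only [List.mem_range] at ht
      simp only [Function.comp_apply]
      exact Prod.ext rfl (by omega))

theorem foldSet_len : ∀ (l : List ((Int × Int) × Int)) (m : List (List Int)),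
    (l.foldl (fun m pv => pvSet2 m pv.1.1 pv.1.2 pv.2) m).length = m.length := by
  intro l
  induction l with
  | nil => intro m; rfl
  | cons e l ih =>
    intro m
    show (l.foldl _ (pvSet2 m e.1.1 e.1.2 e.2)).length = _
    rw [ih, pvSet2_eq, length_s2]

theorem foldSet_rowlen : ∀ (l : List ((Int × Int) × Int)) (m : List (List Int)) (i : Nat),
    ((l.foldl (fun m pv => pvSet2 m pv.1.1 pv.1.2 pv.2) m).getD i []).length
      = (m.getD i []).length := by
  intro l
  induction l with
  | nil => intro m i; rfl
  | cons e l ih =>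
    intro m i
    show ((l.foldl _ (pvSet2 m e.1.1 e.1.2 e.2)).getD i []).length = _
    rw [ih, pvSet2_eq, rowlen_s2]

theorem ringPlace_len (r lo hi : Int) (m : List (List Int)) :
    (pvRingPlace r lo hi m).length = m.length := foldSet_len _ _

theorem ringPlace_rowlen (r lo hi : Int) (m : List (List Int)) (i : Nat) :
    ((pvRingPlace r lo hi m).getD i []).length = (m.getD i []).length := foldSet_rowlen _ _ _

-- ---- one ring: A's repeated shifting equals B's direct placement ----

theorem ring_eq (r : Int) (hr : 0 ≤ r) (a b : Nat) (hab : a < b) (m : List (List Int))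
    (hb : ∀ p ∈ ringP a b, inb m p) :
    (PySem.List.pyRange 0 (r * ((b : Int) - (a : Int))) 1).foldl
        (fun M _ => pvShift (a : Int) (b : Int) M) (wrap m)
      = wrap (pvRingPlace r (a : Int) (b : Int) m) := by
  have hLpos : 0 < (ringP a b).length := by rw [length_ringP hab]; omega
  have hvlen : ((ringP a b).map (g2 0 m)).length = (ringP a b).length := List.length_map ..
  have hTc : r * ((b : Int) - (a : Int)) = ((r * ((b : Int) - (a : Int))).toNat : Int) := by
    rw [Int.toNat_of_nonneg (mul_nonneg hr (by omega))]
  set P := ringP a b with hP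
  set vals := P.map (g2 0 m) with hvals
  set L := P.length with hL
  set T := (r * ((b : Int) - (a : Int))).toNat with hT
  -- A side
  have hA : (PySem.List.pyRange 0 (r * ((b : Int) - (a : Int))) 1).foldl
      (fun M _ => pvShift (a : Int) (b : Int) M) (wrap m)
      = wrap (wr m (P.zip (vals.rotate ((L - 1) * T)))) := by
    rw [foldl_const_eq_iterate (fun M => pvShift (a : Int) (b : Int) M),
      PySem.List.length_pyRange_one, hTc]
    rw [show (((T : Int)) - 0).toNat = T by omega]
    exact iter_shift a b hab m hb T
  rw [hA]
  -- both rotate amounts agree modulo the ring length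
  have hrot : vals.rotate ((L - 1) * T) = vals.rotate ((L - T % L) % L) := by
    conv_lhs => rw [← List.rotate_mod]
    rw [hvlen, mod_arith L T hLpos]
  -- B side
  dsimp only [pvRingPlace]
  rw [ringB_pos a b hab]
  rw [show ((ringP a b).map (fun p => ((p.1 : Int), (p.2 : Int)))).map
        (fun p => pvGet2 0 m p.1 p.2) = vals by
      rw [hvals, hP, List.map_map]
      exact List.map_congr_left (fun p _ => by
        simp only [Function.comp_apply]
        rw [pvGet2_eq, Int.toNat_natCast, Int.toNat_natCast])]
  rw [show (((ringP a b).map (fun p => ((p.1 : Int), (p.2 : Int)))).length : Int) = (L : Int) by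
      rw [List.length_map, hL, hP]]
  rw [hTc, PySem.Int.mod_natCast T L]
  -- the write-back loop is wr over ringP
  have hwr : ∀ vs : List Int,
      ((((ringP a b).map (fun p => ((p.1 : Int), (p.2 : Int)))).zip vs).foldl
        (fun m pv => pvSet2 m pv.1.1 pv.1.2 pv.2) m) = wr m (P.zip vs) := by
    intro vs
    rw [List.zip_map_left, List.foldl_map, hP]
    unfold wr
    apply PySem.List.foldl_congr_mem
    intro acc x _
    rw [pvSet2_eq]
    simp only [Prod.map_fst, Prod.map_snd, id, Int.toNat_natCast]
  rw [hwr]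
  congr 1
  rw [hrot]
  congr 1
  -- the rotated value list B writes
  rcases Nat.eq_zero_or_pos (T % L) with h0 | hpos
  · have hcast : ((T % L : Nat) : Int) = 0 := by rw [h0]; rfl
    have hsl : PySem.List.slice vals none (some (0 : Int)) = [] := by
      rw [PySem.List.slice_to vals (le_refl 0)]
      rfl
    rw [hcast, neg_zero, PySem.List.slice_zero_start, PySem.List.slice_none_none, hsl,
      List.append_nil, h0, Nat.sub_zero, Nat.mod_self, List.rotate_zero]
  · rw [PySem.List.slice_from_neg_natCast vals (T % L) hpos,
      PySem.List.slice_to_neg_natCast vals (T % L) hpos, hvlen,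
      ← List.rotate_eq_drop_append_take (by omega),
      Nat.mod_eq_of_lt (by omega : L - T % L < L)]


-- ---- processing the rings in order, A on wrapped cells equals B on plain cells ----

theorem unwrap_wrap (x : List (List Int)) :
    (wrap x).map (fun row => row.map (fun c => c.getD 0)) = x := by
  unfold wrap
  rw [List.map_map]
  conv_rhs => rw [← List.map_id x]
  exact List.map_congr_left (fun row _ => by
    simp [List.map_map, Function.comp])

theorem outer_eq (r : Int) (hr : 0 ≤ r) (n : Nat) :
    ∀ (ls : List Int) (m : List (List Int)),
    (∀ x ∈ ls, 0 ≤ x ∧ 2 * x + 1 < (n : Int)) →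
    m.length = n → (∀ i, i < n → n ≤ (m.getD i []).length) →
    ls.foldl (fun M loop =>
        (PySem.List.pyRange 0 (r * (((n : Int) - 1 - loop) - loop)) 1).foldl
          (fun M _ => pvShift loop ((n : Int) - 1 - loop) M) M) (wrap m)
      = wrap (ls.foldl (fun m loop => pvRingPlace r loop ((n : Int) - 1 - loop) m) m) := by
  intro ls
  induction ls with
  | nil => intro m _ _ _; rfl
  | cons x ls ih =>
    intro m hx hlen hrow
    obtain ⟨hx0, hxn⟩ := hx x (by simp)
    have hxa : x = ((x.toNat : Nat) : Int) := (Int.toNat_of_nonneg hx0).symm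
    set a := x.toNat with ha
    set b := n - 1 - a with hb
    have hab : a < b := by omega
    have hbn : b < n := by omega
    have hba : ((b : Int)) = (n : Int) - 1 - (a : Int) := by omega
    have hbnds : ∀ p ∈ ringP a b, inb m p := by
      intro p hp
      have hm := mem_ringP hab hp
      refine ⟨by omega, ?_⟩
      have := hrow p.1 (by omega)
      omega
    simp only [List.foldl_cons]
    rw [hxa, ← hba, ring_eq r hr a b hab m hbnds]
    apply ih
    · exact fun y hy => hx y (by simp [hy])
    · rw [ringPlace_len, hlen]
    · intro i hi
      rw [ringPlace_rowlen]
      exact hrow i hi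

-- ===== VERDICT (by name: the statement is the Claim_ definition above) =====
theorem matrix_rotation_spec : Claim_equal_matrix_rotation := by
  unfold Claim_equal_matrix_rotation
  intro matrix rotations _hdom hpre
  unfold Spec_matrix_rotation
  dsimp only [matrix_rotation, matrix_rotation_alt]
  have hfd : PySem.Int.floordiv (matrix.length : Int) 2 = ((matrix.length / 2 : Nat) : Int) := by
    exact_mod_cast PySem.Int.floordiv_natCast matrix.length 2
  rw [hfd]
  have hw : matrix.map (fun row => row.map some) = wrap matrix := rfl
  rcases hpre with hsmall | ⟨hr, hrows⟩
  · -- side ≤ 1: there is no ring, both programs return the matrix unchanged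
    rw [show matrix.length / 2 = 0 by omega, Nat.cast_zero,
      PySem.List.pyRange_one_eq_nil (le_refl 0)]
    rw [hw]
    exact unwrap_wrap matrix
  · have hmem : ∀ x ∈ PySem.List.pyRange 0 ((matrix.length / 2 : Nat) : Int) 1,
        0 ≤ x ∧ 2 * x + 1 < (matrix.length : Int) := by
      intro x hxm
      rw [PySem.List.mem_pyRange_one] at hxm
      omega
    have hrow' : ∀ i, i < matrix.length → matrix.length ≤ (matrix.getD i []).length := by
      intro i hi
      rw [List.getD_eq_getElem _ _ hi]
      exact hrows _ (List.getElem_mem hi)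
    rw [hw, outer_eq rotations hr matrix.length _ matrix hmem rfl hrow', unwrap_wrap]
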